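-- pv_equiv track=rewrite | github.com/PatrykRudzinski/python_bootcamp | jakies tam notatki/funkcje/zadanie2.py | wiecej_niz
-- ===== SOURCE A (Python) =====
-- def wiecej_niz(napis, wiecej):
--     ilosci = {}
--     wynik = set()
--     for l in napis:
--         ilosci[l] = ilosci.get(l, 0) + 1
--     for k, v in ilosci.items():
--         if v > 3:
--             wynik.add(k)
--     return wynik
-- ===== SOURCE B (Python) =====
-- def wiecej_niz(napis, wiecej):
--     if not napis:
--         return set()
--     c = napis[0]
--     kept = {c} if napis.count(c) > 3 else set()
--     return kept | wiecej_niz(napis.replace(c, ''), wiecej)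
-- ===== Notes on version B (the rewrite author's own statement) =====
-- stated objective: alternative
-- what changed: B replaces A's two staged loops over a frequency dictionary (build count table, then filter its items) with a dictionary-free structural recursion on the string: count the first character with str.count, keep it if it occurs more than 3 times, strip all its occurrences with str.replace and recurse on the shrunk string.
import Mathlib
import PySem

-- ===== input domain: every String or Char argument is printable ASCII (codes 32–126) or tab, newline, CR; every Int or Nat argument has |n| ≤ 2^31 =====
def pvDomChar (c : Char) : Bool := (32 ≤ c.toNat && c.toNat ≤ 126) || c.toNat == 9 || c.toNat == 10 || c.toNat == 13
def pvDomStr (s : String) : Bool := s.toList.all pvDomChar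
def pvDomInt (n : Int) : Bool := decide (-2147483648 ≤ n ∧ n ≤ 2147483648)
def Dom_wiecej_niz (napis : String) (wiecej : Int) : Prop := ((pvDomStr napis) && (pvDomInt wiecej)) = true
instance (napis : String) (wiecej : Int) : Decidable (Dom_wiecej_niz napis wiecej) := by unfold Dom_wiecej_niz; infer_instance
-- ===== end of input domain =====

-- B replaces A's build-a-frequency-dict-then-filter loops with a structural recursion on the string
-- (keep the first character if it occurs more than 3 times, strip all its occurrences, recurse); alternative decomposition, no dict.


-- ===== PORT A =====
-- Port of A: build a frequency dict over the characters, then add keys with value > 3 to a set.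
def wiecej_niz (napis : String) (wiecej : Int) : List String :=
  let ilosci := (napis.toList.map (fun c => String.mk [c])).foldl
    (fun d l => d.insert l (d.getD l 0 + 1)) PySem.Dict.empty
  let wynik := ilosci.items.foldl
    (fun w (kv : String × Int) => if kv.2 > 3 then PySem.Set.add w kv.1 else w) PySem.Set.empty
  wynik

-- ===== PORT B =====
-- Port of B's recursion on the string (as its list of 1-char strings): c = napis[0];
-- kept = {c} if napis.count(c) > 3 else set(); return kept | wiecej_niz(napis.replace(c, ''), wiecej).
def wiecejNizGo (l : List String) : List String :=
  match l with
  | [] => PySem.Set.empty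
  | c :: rest =>
      let kept : PySem.Set String :=
        if (c :: rest).count c > 3 then PySem.Set.add PySem.Set.empty c else PySem.Set.empty
      PySem.Set.union kept (wiecejNizGo (rest.filter (fun x => x ≠ c)))
termination_by l.length
decreasing_by
  show (List.filter _ rest.attach).unattach.length < rest.length + 1
  rw [List.unattach, List.length_map]
  exact Nat.lt_succ_of_le (le_trans (List.length_filter_le _ _) (by rw [List.length_attach]))

def wiecej_niz_alt (napis : String) (wiecej : Int) : List String :=
  wiecejNizGo (napis.toList.map (fun c => String.mk [c]))

-- ===== PRECONDITION & SPEC =====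
def Spec_wiecej_niz (napis : String) (wiecej : Int) (out : List String) : Prop := out = wiecej_niz_alt napis wiecej
instance (napis : String) (wiecej : Int) (out : List String) : Decidable (Spec_wiecej_niz napis wiecej out) := by unfold Spec_wiecej_niz; infer_instance

-- ===== CLAIM (what is proved, stated in full; the proofs are below) =====
def Claim_equal_wiecej_niz : Prop := ∀ (napis : String) (wiecej : Int), Dom_wiecej_niz napis wiecej → Spec_wiecej_niz napis wiecej (wiecej_niz napis wiecej)

-- ===== LEMMAS AND PROOFS =====
-- Both ports equal the canonical form: the first-occurrence-distinct characters whose count exceeds 3.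

theorem pv_discard_eq_filter (s : PySem.Set String) (x : String) :
    PySem.Set.discard s x = s.filter (fun y => decide (y ≠ x)) := by
  simp only [PySem.Set.discard]
  exact List.filter_congr (by intro y _; rw [Bool.eq_iff_iff]; simp)

theorem pv_filter_swap (l : List String) (p q : String → Bool) :
    (l.filter p).filter q = (l.filter q).filter p := by
  rw [List.filter_filter, List.filter_filter]
  exact List.filter_congr (by intro y _; rw [Bool.and_comm])

theorem pv_ofList_filter (c : String) (xs : List String) :
    PySem.Set.ofList (xs.filter (fun x => decide (x ≠ c)))
      = (PySem.Set.ofList xs).filter (fun x => decide (x ≠ c)) := by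
  induction xs with
  | nil => rfl
  | cons x xs ih =>
    rw [List.filter_cons, PySem.Set.ofList_cons, List.filter_cons, pv_discard_eq_filter]
    by_cases hx : x = c
    · subst hx
      simp only [ne_eq, not_true_eq_false, decide_false, Bool.false_eq_true, if_false, ih]
      rw [List.filter_filter]
      exact (List.filter_congr (by intro y _; rw [Bool.and_self])).symm
    · have hd : decide (x ≠ c) = true := by simp [hx]
      simp only [hd, if_true]
      rw [PySem.Set.ofList_cons, pv_discard_eq_filter, ih, pv_filter_swap]

theorem pv_go_eq (n : Nat) : ∀ (l : List String), l.length ≤ n →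
    wiecejNizGo l = (PySem.Set.ofList l).filter (fun x => decide ((l.count x : Int) > 3)) := by
  induction n with
  | zero =>
    intro l h
    have : l = [] := List.eq_nil_of_length_eq_zero (Nat.le_zero.mp h)
    subst this; simp [wiecejNizGo]
  | succ n ih =>
    intro l hl
    match l with
    | [] => simp [wiecejNizGo]
    | c :: rest =>
      rw [wiecejNizGo]
      have hlen : (rest.filter (fun x => decide (x ≠ c))).length ≤ n :=
        le_trans (List.length_filter_le _ _) (Nat.le_of_succ_le_succ hl)
      rw [ih _ hlen, pv_ofList_filter]
      have htail :
          ((PySem.Set.ofList rest).filter (fun x => decide (x ≠ c))).filter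
              (fun x => decide (((rest.filter (fun y => decide (y ≠ c))).count x : Int) > 3))
            = ((PySem.Set.ofList rest).filter (fun x => decide (x ≠ c))).filter
              (fun x => decide ((((c :: rest).count x : Int)) > 3)) := by
        apply List.filter_congr
        intro x hx
        have hxc : x ≠ c := by simpa using List.of_mem_filter hx
        have hcnt : (rest.filter (fun y => decide (y ≠ c))).count x = (c :: rest).count x := by
          rw [List.count_filter (by simp [hxc]), List.count_cons]
          simp [Ne.symm hxc]
        rw [hcnt]
      rw [htail]
      set tail := ((PySem.Set.ofList rest).filter (fun x => decide (x ≠ c))).filter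
          (fun x => decide ((((c :: rest).count x : Int)) > 3)) with htaildef
      have hnd : tail.Nodup := ((PySem.Set.nodup_ofList rest).filter _).filter _
      have hne : ∀ x ∈ tail, x ≠ c := by
        intro x hx
        simpa using List.of_mem_filter (List.mem_of_mem_filter hx)
      rw [PySem.Set.ofList_cons, pv_discard_eq_filter]
      by_cases hkeep : (c :: rest).count c > 3
      · have hkeepI : ((c :: rest).count c : Int) > 3 := by exact_mod_cast hkeep
        have hkept : (if (c :: rest).count c > 3 then PySem.Set.add PySem.Set.empty c else PySem.Set.empty) = [c] := by
          rw [if_pos hkeep]; rfl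
        rw [hkept]
        have hu : PySem.Set.union [c] tail = [c] ++ tail := by
          show PySem.Set.update [c] tail = [c] ++ tail
          exact PySem.Set.update_eq_append_of_disjoint _ _ hnd (by intro x hx; simp [hne x hx])
        rw [hu, List.filter_cons]
        simp only [hkeepI, decide_true, if_true]
        rw [htaildef, pv_filter_swap]
        rfl
      · have hkeepI : ¬ (((c :: rest).count c : Int) > 3) := by exact_mod_cast hkeep
        have hkept : (if (c :: rest).count c > 3 then PySem.Set.add PySem.Set.empty c else PySem.Set.empty) = ([] : List String) := by
          rw [if_neg hkeep]; rfl
        rw [hkept]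
        have hu : PySem.Set.union [] tail = tail := by
          show PySem.Set.update [] tail = tail
          rw [PySem.Set.update_nil_left]
          exact PySem.Set.ofList_eq_self_of_nodup _ hnd
        rw [hu, List.filter_cons]
        simp only [hkeepI, decide_false, Bool.false_eq_true, if_false]
        rw [htaildef, pv_filter_swap]

theorem pv_A_eq (chars : List String) :
    ((chars.foldl (fun d l => d.insert l (d.getD l 0 + 1)) PySem.Dict.empty).items.foldl
        (fun w (kv : String × Int) => if kv.2 > 3 then PySem.Set.add w kv.1 else w) PySem.Set.empty)
      = (PySem.Set.ofList chars).filter (fun x => decide ((chars.count x : Int) > 3)) := by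
  rw [PySem.Dict.foldl_insert_getD_add_one_eq_counter, PySem.Dict.items_counter, List.foldl_map]
  rw [PySem.List.foldl_ite_eq_foldl_filter]
  have hnd : ((PySem.Set.ofList chars).filter (fun x => decide ((chars.count x : Int) > 3))).Nodup :=
    (PySem.Set.nodup_ofList chars).filter _
  show List.foldl PySem.Set.add [] _ = _
  rw [← PySem.Set.ofList_eq_foldl]
  exact PySem.Set.ofList_eq_self_of_nodup _ hnd

-- ===== VERDICT (by name: the statement is the Claim_ definition above) =====
theorem wiecej_niz_spec : Claim_equal_wiecej_niz := by
  intro napis wiecej _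
  unfold Spec_wiecej_niz wiecej_niz wiecej_niz_alt
  dsimp only
  rw [pv_go_eq (napis.toList.map (fun c => String.mk [c])).length _ le_rfl]
  exact pv_A_eq _
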